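-- pv_equiv track=rewrite | github.com/kittilsenstian-debug/the-hand | theory-tools/nuclear_binding.py | algebraic_score
-- ===== SOURCE A (Python) =====
-- BRANCHING_DIMS = {
--     1, 2, 3, 4, 5, 6, 7, 8, 10, 12, 14, 15, 16, 18, 20, 21, 24,
--     26, 27, 28, 30, 33, 36, 37, 40, 43, 45, 48, 52, 54, 56, 60,
--     64, 67, 71, 72, 78, 80, 120, 126, 133, 240, 248, 744
-- }
--
-- def algebraic_score(n):
--     """
--     Score how 'algebraically clean' a number is.
--     3 = exact match (in allowed set)
--     2 = product of two allowed numbers (both > 1)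
--     1 = sum of two allowed numbers
--     0 = no algebraic decomposition
--     """
--     if n in BRANCHING_DIMS:
--         return 3, "EXACT", ""
--
--     # Product
--     for a in sorted(BRANCHING_DIMS):
--         if a < 2:
--             continue
--         if a * a > n:
--             break
--         if n % a == 0:
--             b = n // a
--             if b in BRANCHING_DIMS and b >= a:
--                 return 2, "PRODUCT", f"{a}x{b}"
--
--     # Sum
--     for a in sorted(BRANCHING_DIMS):
--         if a >= n:
--             break
--         b = n - a
--         if b in BRANCHING_DIMS and b >= a:
--             return 1, "SUM", f"{a}+{b}"
--
--     return 0, "MISS", ""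
-- ===== SOURCE B (Python) =====
-- BRANCHING_DIMS = {
--     1, 2, 3, 4, 5, 6, 7, 8, 10, 12, 14, 15, 16, 18, 20, 21, 24,
--     26, 27, 28, 30, 33, 36, 37, 40, 43, 45, 48, 52, 54, 56, 60,
--     64, 67, 71, 72, 78, 80, 120, 126, 133, 240, 248, 744
-- }
--
-- def algebraic_score(n):
--     if n in BRANCHING_DIMS:
--         return 3, "EXACT", ""
--
--     # Product tier: search pairs (a, b) from the set instead of trial division.
--     a = min((a for a in BRANCHING_DIMS for b in BRANCHING_DIMS
--              if a >= 2 and b >= a and a * b == n), default=None)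
--     if a is not None:
--         return 2, "PRODUCT", f"{a}x{n // a}"
--
--     # Sum tier: search addends a with partner n - a also in the set.
--     a = min((a for a in BRANCHING_DIMS if (n - a) in BRANCHING_DIMS and n - a >= a),
--             default=None)
--     if a is not None:
--         return 1, "SUM", f"{a}+{n - a}"
--
--     return 0, "MISS", ""
-- ===== Notes on version B (the rewrite author's own statement) =====
-- stated objective: alternative
-- what changed: Replaces A's ordered trial-division loops with continue/break (divisor scan to sqrt(n) for the product tier, addend scan cut off at a>=n for the sum tier) by break-free minimum-of-candidates searches: the product tier enumerates pairs (a,b) from the fixed set with a*b==n and the sum tier addends a with n-a in the set, each taking min with default=None.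
import Mathlib
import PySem

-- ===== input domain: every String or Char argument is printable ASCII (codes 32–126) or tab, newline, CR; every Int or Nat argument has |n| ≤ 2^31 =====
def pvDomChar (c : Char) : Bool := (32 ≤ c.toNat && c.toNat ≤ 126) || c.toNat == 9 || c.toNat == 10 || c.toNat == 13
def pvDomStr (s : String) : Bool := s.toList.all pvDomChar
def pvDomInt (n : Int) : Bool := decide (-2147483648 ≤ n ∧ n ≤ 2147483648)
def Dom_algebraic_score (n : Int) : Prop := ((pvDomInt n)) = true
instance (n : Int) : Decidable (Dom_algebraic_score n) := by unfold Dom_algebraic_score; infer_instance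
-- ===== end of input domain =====

-- B replaces A's trial-division loops (with √n / a≥n breaks) by min-of-candidate
-- searches over pairs drawn from the fixed dimension set; objective: alternative.

-- ===== PORT A =====
-- sorted(BRANCHING_DIMS): the set literal, in ascending order
def pyDims : List Int := [1, 2, 3, 4, 5, 6, 7, 8, 10, 12, 14, 15, 16, 18, 20, 21, 24,
  26, 27, 28, 30, 33, 36, 37, 40, 43, 45, 48, 52, 54, 56, 60,
  64, 67, 71, 72, 78, 80, 120, 126, 133, 240, 248, 744]

-- the 'Product' for-loop of A, with its continue/break, step for step
def prodLoop (n : Int) : List Int → Option (Int × Int)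
  | [] => none
  | a :: rest =>
    if a < 2 then prodLoop n rest
    else if n < a * a then none           -- `if a * a > n: break`
    else if PySem.Int.mod n a = 0 then
      let b := PySem.Int.floordiv n a
      if b ∈ pyDims ∧ a ≤ b then some (a, b) else prodLoop n rest
    else prodLoop n rest

-- the 'Sum' for-loop of A
def sumLoop (n : Int) : List Int → Option (Int × Int)
  | [] => none
  | a :: rest =>
    if n ≤ a then none                    -- `if a >= n: break`
    else
      let b := n - a
      if b ∈ pyDims ∧ a ≤ b then some (a, b) else sumLoop n rest

def algebraic_score (n : Int) : Int × String × String :=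
  if n ∈ pyDims then (3, "EXACT", "")
  else
    match prodLoop n pyDims with
    | some (a, b) => (2, "PRODUCT", PySem.Int.toStr a ++ "x" ++ PySem.Int.toStr b)
    | none =>
      match sumLoop n pyDims with
      | some (a, b) => (1, "SUM", PySem.Int.toStr a ++ "+" ++ PySem.Int.toStr b)
      | none => (0, "MISS", "")

-- ===== PORT B =====
-- Source B: min over a pair comprehension (min over a set is order-independent,
-- so the set is iterated here in the literal's order)
def algebraic_score_alt (n : Int) : Int × String × String :=
  if n ∈ pyDims then (3, "EXACT", "")
  else
    match PySem.List.min?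
        (pyDims.flatMap (fun a =>
          (pyDims.filter (fun b => decide (2 ≤ a) && decide (a ≤ b) && decide (a * b = n))).map
            (fun _ => a)))
        (fun x => x) with
    | some a => (2, "PRODUCT", PySem.Int.toStr a ++ "x" ++ PySem.Int.toStr (PySem.Int.floordiv n a))
    | none =>
      match PySem.List.min?
          (pyDims.filter (fun a => decide ((n - a) ∈ pyDims) && decide (a ≤ n - a)))
          (fun x => x) with
      | some a => (1, "SUM", PySem.Int.toStr a ++ "+" ++ PySem.Int.toStr (n - a))
      | none => (0, "MISS", "")

-- ===== PRECONDITION & SPEC =====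
def Spec_algebraic_score (n : Int) (out : Int × String × String) : Prop := out = algebraic_score_alt n
instance (n : Int) (out : Int × String × String) : Decidable (Spec_algebraic_score n out) := by unfold Spec_algebraic_score; infer_instance

-- ===== CLAIM (what is proved, stated in full; the proofs are below) =====
def Claim_equal_algebraic_score : Prop := ∀ (n : Int), Dom_algebraic_score n → Spec_algebraic_score n (algebraic_score n)

-- ===== LEMMAS AND PROOFS =====

-- Bool candidate predicates characterising what A's loops accept
def prodCand (n a : Int) : Bool :=
  decide (2 ≤ a) && decide (a * a ≤ n) && decide (PySem.Int.mod n a = 0) &&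
    decide (PySem.Int.floordiv n a ∈ pyDims) && decide (a ≤ PySem.Int.floordiv n a)

def sumCand (n a : Int) : Bool := decide ((n - a) ∈ pyDims) && decide (a ≤ n - a)

theorem pyDims_sorted : pyDims.Pairwise (· ≤ ·) := by decide
theorem pyDims_pos : ∀ x ∈ pyDims, (1 : Int) ≤ x := by decide

theorem prodLoop_eq (n : Int) (l : List Int) (hs : l.Pairwise (· ≤ ·)) :
    prodLoop n l = ((l.filter (prodCand n)).head?).map (fun a => (a, PySem.Int.floordiv n a)) := by
  induction l with
  | nil => simp [prodLoop]
  | cons a rest ih =>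
    obtain ⟨hle, hs'⟩ := List.pairwise_cons.mp hs
    by_cases h2 : a < 2
    · have hc : prodCand n a = false := by
        simp only [prodCand, Bool.and_eq_false_iff, decide_eq_false_iff_not]
        left; left; left; left; omega
      simp [prodLoop, h2, hc, ih hs']
    · by_cases hbr : n < a * a
      · have hnil : (a :: rest).filter (prodCand n) = [] := by
          rw [List.filter_eq_nil_iff]
          intro x hx hc
          simp only [prodCand, Bool.and_eq_true, decide_eq_true_eq] at hc
          rcases List.mem_cons.mp hx with rfl | hxr
          · omega
          · have hax := hle x hxr
            nlinarith [hc.1.1.1.1, hc.1.1.1.2]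
        simp [prodLoop, h2, hbr, hnil]
      · by_cases hmod : PySem.Int.mod n a = 0
        · by_cases hcond : PySem.Int.floordiv n a ∈ pyDims ∧ a ≤ PySem.Int.floordiv n a
          · have hc : prodCand n a = true := by
              simp only [prodCand, Bool.and_eq_true, decide_eq_true_eq]
              exact ⟨⟨⟨⟨by omega, by omega⟩, hmod⟩, hcond.1⟩, hcond.2⟩
            simp [prodLoop, h2, hbr, hmod, hcond, hc]
          · have hc : prodCand n a = false := by
              rcases (not_and_or.mp hcond) with hnc | hnc
              · simp only [prodCand, Bool.and_eq_false_iff, decide_eq_false_iff_not]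
                left; right; exact hnc
              · simp only [prodCand, Bool.and_eq_false_iff, decide_eq_false_iff_not]
                right; exact hnc
            simp [prodLoop, h2, hbr, hmod, hcond, hc, ih hs']
        · have hc : prodCand n a = false := by
            simp only [prodCand, Bool.and_eq_false_iff, decide_eq_false_iff_not]
            left; left; right; exact hmod
          simp [prodLoop, h2, hbr, hmod, hc, ih hs']

theorem sumLoop_eq (n : Int) (l : List Int) (hs : l.Pairwise (· ≤ ·))
    (hp : ∀ x ∈ l, (1 : Int) ≤ x) :
    sumLoop n l = ((l.filter (sumCand n)).head?).map (fun a => (a, n - a)) := by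
  induction l with
  | nil => simp [sumLoop]
  | cons a rest ih =>
    obtain ⟨hle, hs'⟩ := List.pairwise_cons.mp hs
    by_cases hbr : n ≤ a
    · have hnil : (a :: rest).filter (sumCand n) = [] := by
        rw [List.filter_eq_nil_iff]
        intro x hx hc
        simp only [sumCand, Bool.and_eq_true, decide_eq_true_eq] at hc
        have hx1 : (1 : Int) ≤ n - x := pyDims_pos _ hc.1
        rcases List.mem_cons.mp hx with rfl | hxr
        · omega
        · have := hle x hxr; omega
      simp [sumLoop, hbr, hnil]
    · by_cases hcond : (n - a) ∈ pyDims ∧ a ≤ n - a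
      · have hc : sumCand n a = true := by
          simp only [sumCand, Bool.and_eq_true, decide_eq_true_eq]
          exact hcond
        simp [sumLoop, hbr, hcond, hc]
      · have hc : sumCand n a = false := by
          rcases (not_and_or.mp hcond) with hnc | hnc <;>
            simp only [sumCand, Bool.and_eq_false_iff, decide_eq_false_iff_not]
          · left; exact hnc
          · right; exact hnc
        simp [sumLoop, hbr, hcond, hc,
          ih hs' (fun x hx => hp x (List.mem_cons_of_mem a hx))]

-- min over any list with the same members as a sorted list F is F's head
theorem min?_eq_head? (L F : List Int) (hmem : ∀ x, x ∈ L ↔ x ∈ F)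
    (hF : F.Pairwise (· ≤ ·)) :
    PySem.List.min? L (fun x => x) = F.head? := by
  cases F with
  | nil =>
    have hL : L = [] := List.eq_nil_iff_forall_not_mem.mpr (fun x hx => by
      exact absurd ((hmem x).mp hx) (List.not_mem_nil))
    simp [hL, PySem.List.min?]
  | cons h t =>
    have hhL : h ∈ L := (hmem h).mpr (List.mem_cons_self)
    cases hmin : PySem.List.min? L (fun x => x) with
    | none =>
      have : L = [] := (PySem.List.min?_eq_none_iff L _).mp hmin
      rw [this] at hhL; exact absurd hhL (List.not_mem_nil)
    | some m =>
      have hmL : m ∈ L := PySem.List.min?_mem hmin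
      have hmle : m ≤ h := PySem.List.min?_isMin hmin h hhL
      have hhm : h ≤ m := by
        rcases List.mem_cons.mp ((hmem m).mp hmL) with hm | hm
        · exact le_of_eq hm.symm
        · exact (List.pairwise_cons.mp hF).1 m hm
      simp [le_antisymm hmle hhm]

-- membership in B's pair-comprehension list ↔ membership in the prodCand filter
theorem mem_pairList_iff (n x : Int) :
    x ∈ (pyDims.flatMap (fun a =>
          (pyDims.filter (fun b => decide (2 ≤ a) && decide (a ≤ b) && decide (a * b = n))).map
            (fun _ => a)))
      ↔ x ∈ pyDims.filter (prodCand n) := by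
  simp only [List.mem_flatMap, List.mem_map, List.mem_filter, Bool.and_eq_true,
    decide_eq_true_eq]
  constructor
  · rintro ⟨a, ha, b, ⟨hb, ⟨h2a, hab⟩, hn⟩, rfl⟩
    have ha0 : (0 : Int) < a := by omega
    have hdvd : a ∣ n := ⟨b, hn.symm⟩
    have hfd : PySem.Int.floordiv n a = b := by
      rw [PySem.Int.floordiv_eq_iff_of_pos ha0]
      constructor <;> nlinarith
    refine ⟨ha, ?_⟩
    simp only [prodCand, Bool.and_eq_true, decide_eq_true_eq, hfd]
    refine ⟨⟨⟨⟨h2a, by nlinarith⟩, (PySem.Int.mod_eq_zero_iff_dvd n a).mpr hdvd⟩, hb⟩, hab⟩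
  · rintro ⟨hx, hc⟩
    simp only [prodCand, Bool.and_eq_true, decide_eq_true_eq] at hc
    obtain ⟨⟨⟨⟨h2x, hxx⟩, hmod⟩, hfdm⟩, hxfd⟩ := hc
    have hn : n = PySem.Int.floordiv n x * x := by
      have := PySem.Int.floordiv_mul_add_mod n x
      omega
    exact ⟨x, hx, PySem.Int.floordiv n x, ⟨hfdm, ⟨h2x, hxfd⟩, by linarith [hn]⟩, rfl⟩

-- ===== VERDICT (by name: the statement is the Claim_ definition above) =====
theorem algebraic_score_spec : Claim_equal_algebraic_score := by
  intro n _
  unfold Spec_algebraic_score algebraic_score algebraic_score_alt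
  by_cases hmem : n ∈ pyDims
  · simp [hmem]
  · simp only [hmem, if_false]
    rw [prodLoop_eq n pyDims pyDims_sorted,
        sumLoop_eq n pyDims pyDims_sorted pyDims_pos,
        min?_eq_head? _ (pyDims.filter (prodCand n)) (mem_pairList_iff n)
          (List.Pairwise.filter _ pyDims_sorted)]
    rw [min?_eq_head? (pyDims.filter (fun a => decide ((n - a) ∈ pyDims) && decide (a ≤ n - a)))
        (pyDims.filter (sumCand n)) (fun x => Iff.rfl) (List.Pairwise.filter _ pyDims_sorted)]
    cases (pyDims.filter (prodCand n)).head? with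
    | some a => simp
    | none =>
      cases (pyDims.filter (sumCand n)).head? with
      | some a => simp
      | none => simp
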